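-- pv_equiv track=rewrite | github.com/yumiweidemao/py | intro2algorithms/1_basics/divide_and_conquer/strassen.py | merge_matrix
-- ===== SOURCE A (Python) =====
-- def merge_matrix(C11, C12, C21, C22):
--     # merge 4 n*n matrices into a 2n*2n matrix
--     mid = len(C11)
--     n = mid * 2
--
--     C = [[0 for _ in range(n)] for _ in range(n)]
--
--     for i in range(n):
--         for j in range(n):
--             if i < mid and j < mid:
--                 C[i][j] = C11[i%mid][j%mid]
--             elif i >= mid and j >= mid:
--                 C[i][j] = C22[i%mid][j%mid]
--             elif i < mid and j >= mid:
--                 C[i][j] = C12[i%mid][j%mid]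
--             elif i >= mid and j < mid:
--                 C[i][j] = C21[i%mid][j%mid]
--
--     return C
-- ===== SOURCE B (Python) =====
-- def merge_matrix(C11, C12, C21, C22):
--     # merge 4 n*n matrices into a 2n*2n matrix: top rows are C11|C12, bottom rows C21|C22
--     mid = len(C11)
--     top = [C11[i][:mid] + C12[i][:mid] for i in range(mid)]
--     bottom = [C21[i][:mid] + C22[i][:mid] for i in range(mid)]
--     return top + bottom
-- ===== Notes on version B (the rewrite author's own statement) =====
-- stated objective: idiomatic
-- what changed: Replaces the zero-initialized 2n x 2n matrix and the element-wise four-way branching double loop by direct row concatenation (top rows C11|C12, bottom rows C21|C22), looping only over the mid row indices; dropping the per-cell branch/assignment for C-level list slicing and concatenation is also a measured constant-factor speedup.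
import Mathlib
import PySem

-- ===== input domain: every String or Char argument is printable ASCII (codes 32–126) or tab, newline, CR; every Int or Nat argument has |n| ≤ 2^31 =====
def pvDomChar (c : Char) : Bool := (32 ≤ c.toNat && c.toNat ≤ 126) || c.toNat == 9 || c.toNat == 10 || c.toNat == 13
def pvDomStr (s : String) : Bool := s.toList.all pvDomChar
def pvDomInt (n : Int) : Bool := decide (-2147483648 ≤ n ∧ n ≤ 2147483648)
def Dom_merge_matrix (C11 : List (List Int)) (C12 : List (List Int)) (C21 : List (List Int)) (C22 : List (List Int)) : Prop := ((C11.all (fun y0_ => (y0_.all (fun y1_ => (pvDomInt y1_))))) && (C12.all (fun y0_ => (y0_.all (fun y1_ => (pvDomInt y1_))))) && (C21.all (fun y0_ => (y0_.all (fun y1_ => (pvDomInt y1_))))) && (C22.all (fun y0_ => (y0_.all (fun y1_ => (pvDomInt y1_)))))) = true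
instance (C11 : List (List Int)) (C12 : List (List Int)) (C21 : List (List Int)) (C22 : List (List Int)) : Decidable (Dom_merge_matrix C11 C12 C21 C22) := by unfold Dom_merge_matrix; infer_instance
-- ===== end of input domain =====

-- B replaces A's zero-filled 2n×2n matrix and element-wise four-way branching double loop
-- by plain row concatenation (top rows C11|C12, bottom rows C21|C22); objective: idiomatic.

-- ===== PORT A =====
-- the value A's if/elif chain assigns to C[i][j] (the four branches are exhaustive for i,j < 2*mid)
def mmVal (C11 : List (List Int)) (C12 : List (List Int)) (C21 : List (List Int)) (C22 : List (List Int)) (mid i j : Nat) : Int :=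
  if i < mid ∧ j < mid then (C11.getD (i % mid) []).getD (j % mid) 0
  else if mid ≤ i ∧ mid ≤ j then (C22.getD (i % mid) []).getD (j % mid) 0
  else if i < mid ∧ mid ≤ j then (C12.getD (i % mid) []).getD (j % mid) 0
  else (C21.getD (i % mid) []).getD (j % mid) 0

def merge_matrix (C11 : List (List Int)) (C12 : List (List Int)) (C21 : List (List Int)) (C22 : List (List Int)) : List (List Int) :=
  let mid := C11.length
  let n := mid * 2
  let C0 := (List.range n).map (fun _ => (List.range n).map (fun _ => (0 : Int)))
  (List.range n).foldl (fun C i =>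
    (List.range n).foldl (fun C j =>
      C.modify i (fun row => row.set j (mmVal C11 C12 C21 C22 mid i j))) C) C0

-- ===== PORT B =====
-- row[:mid] is List.take mid (exact: mid ≥ 0 and a slice past the end just stops at the end)
def merge_matrix_alt (C11 : List (List Int)) (C12 : List (List Int)) (C21 : List (List Int)) (C22 : List (List Int)) : List (List Int) :=
  let mid := C11.length
  ((List.range mid).map (fun i => (C11.getD i []).take mid ++ (C12.getD i []).take mid))
    ++ ((List.range mid).map (fun i => (C21.getD i []).take mid ++ (C22.getD i []).take mid))

-- ===== PRECONDITION & SPEC =====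
-- Pre_ is exactly A's return domain: with mid = len(C11), each block must have at least mid rows
-- whose first mid rows each have at least mid entries; otherwise A raises IndexError.
def Pre_merge_matrix (C11 : List (List Int)) (C12 : List (List Int)) (C21 : List (List Int)) (C22 : List (List Int)) : Prop :=
  C11.length ≤ C12.length ∧ C11.length ≤ C21.length ∧ C11.length ≤ C22.length ∧
  (∀ r ∈ C11, C11.length ≤ r.length) ∧
  (∀ r ∈ C12.take C11.length, C11.length ≤ r.length) ∧
  (∀ r ∈ C21.take C11.length, C11.length ≤ r.length) ∧
  (∀ r ∈ C22.take C11.length, C11.length ≤ r.length)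
instance (C11 : List (List Int)) (C12 : List (List Int)) (C21 : List (List Int)) (C22 : List (List Int)) : Decidable (Pre_merge_matrix C11 C12 C21 C22) := by unfold Pre_merge_matrix; infer_instance

def pvWitness_merge_matrix : List (List Int) × List (List Int) × List (List Int) × List (List Int) :=
  ([[1, 2], [3, 4]], [[5, 6], [7, 8]], [[9, 10], [11, 12]], [[13, 14], [15, 16]])

def Spec_merge_matrix (C11 : List (List Int)) (C12 : List (List Int)) (C21 : List (List Int)) (C22 : List (List Int)) (out : List (List Int)) : Prop := out = merge_matrix_alt C11 C12 C21 C22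
instance (C11 : List (List Int)) (C12 : List (List Int)) (C21 : List (List Int)) (C22 : List (List Int)) (out : List (List Int)) : Decidable (Spec_merge_matrix C11 C12 C21 C22 out) := by unfold Spec_merge_matrix; infer_instance

-- ===== CLAIM (what is proved, stated in full; the proofs are below) =====
def Claim_equal_merge_matrix : Prop := ∀ (C11 : List (List Int)) (C12 : List (List Int)) (C21 : List (List Int)) (C22 : List (List Int)), Dom_merge_matrix C11 C12 C21 C22 → Pre_merge_matrix C11 C12 C21 C22 → Spec_merge_matrix C11 C12 C21 C22 (merge_matrix C11 C12 C21 C22)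

-- ===== LEMMAS AND PROOFS =====

theorem pv_modify_modify {α : Type} (f g : α → α) :
    ∀ (l : List α) (i : Nat), (l.modify i f).modify i g = l.modify i (fun a => g (f a)) := by
  intro l
  induction l with
  | nil => intro i; simp
  | cons a t ih => intro i; cases i <;> simp [ih]

theorem pv_foldl_modify_collapse {α : Type} (i : Nat) (h : Nat → α → α) :
    ∀ (l : List Nat) (C : List α),
      l.foldl (fun C j => C.modify i (h j)) C
        = C.modify i (fun r => l.foldl (fun r j => h j r) r) := by
  intro l
  induction l with
  | nil => intro C; exact (List.modify_id i C).symm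
  | cons a t ih => intro C; simp only [List.foldl_cons, ih, pv_modify_modify]

theorem pv_modify_append_len {α : Type} (f : α → α) :
    ∀ (l1 : List α) (a : α) (l2 : List α),
      (l1 ++ a :: l2).modify l1.length f = l1 ++ f a :: l2 := by
  intro l1
  induction l1 with
  | nil => intro a l2; simp
  | cons b t ih => intro a l2; simp [ih]

theorem pv_foldl_modify_range {α : Type} (d : α) (F : Nat → α → α) :
    ∀ (n : Nat) (r : List α), n ≤ r.length →
      (List.range n).foldl (fun r j => r.modify j (F j)) r
        = (List.range n).map (fun j => F j (r.getD j d)) ++ r.drop n := by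
  intro n
  induction n with
  | zero => intro r _; simp
  | succ m ih =>
      intro r hlen
      have hm : m < r.length := by omega
      rw [List.range_succ, List.foldl_append, ih r (by omega), List.map_append]
      have hdrop : r.drop m = r[m] :: r.drop (m + 1) := List.drop_eq_getElem_cons hm
      rw [hdrop]
      have hlenmap : (List.map (fun j => F j (r.getD j d)) (List.range m)).length = m := by simp
      calc List.foldl (fun r j => r.modify j (F j))
              ((List.map (fun j => F j (r.getD j d)) (List.range m)) ++ r[m] :: r.drop (m + 1)) [m]
          = ((List.map (fun j => F j (r.getD j d)) (List.range m)) ++ r[m] :: r.drop (m + 1)).modify m (F m) := by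
              simp
        _ = ((List.map (fun j => F j (r.getD j d)) (List.range m)) ++ r[m] :: r.drop (m + 1)).modify
              (List.map (fun j => F j (r.getD j d)) (List.range m)).length (F m) := by rw [hlenmap]
        _ = (List.map (fun j => F j (r.getD j d)) (List.range m)) ++ F m r[m] :: r.drop (m + 1) :=
              pv_modify_append_len _ _ _ _
        _ = _ := by simp [List.getD, List.getElem?_eq_getElem hm]

-- A's result is the matrix of mmVal values.
theorem merge_matrix_eq_map (C11 C12 C21 C22 : List (List Int)) :
    merge_matrix C11 C12 C21 C22
      = (List.range (C11.length * 2)).map (fun i =>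
          (List.range (C11.length * 2)).map (fun j => mmVal C11 C12 C21 C22 C11.length i j)) := by
  unfold merge_matrix
  simp only
  -- collapse the inner loop into a single modify per row
  have hstep : (fun (C : List (List Int)) (i : Nat) =>
        (List.range (C11.length * 2)).foldl
          (fun C j => C.modify i (fun row => row.set j (mmVal C11 C12 C21 C22 C11.length i j))) C)
      = (fun C i => C.modify i (fun r =>
          (List.range (C11.length * 2)).foldl
            (fun r j => r.set j (mmVal C11 C12 C21 C22 C11.length i j)) r)) := by
    funext C i
    exact pv_foldl_modify_collapse i
      (fun j row => row.set j (mmVal C11 C12 C21 C22 C11.length i j)) _ C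
  rw [hstep]
  -- outer loop: each row is modified once, in increasing index order
  rw [pv_foldl_modify_range ([] : List Int)
        (fun i r => (List.range (C11.length * 2)).foldl
          (fun r j => r.set j (mmVal C11 C12 C21 C22 C11.length i j)) r)
        (C11.length * 2) _ (by simp)]
  rw [List.drop_eq_nil_of_le (by simp), List.append_nil]
  apply List.map_congr_left
  intro i hi
  have hi' : i < C11.length * 2 := List.mem_range.mp hi
  have hrow : ((List.range (C11.length * 2)).map
        (fun _ => (List.range (C11.length * 2)).map (fun _ => (0 : Int)))).getD i []
      = (List.range (C11.length * 2)).map (fun _ => (0 : Int)) := by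
    rw [List.getD_eq_getElem _ _ (by simpa using hi')]
    simp
  rw [hrow]
  -- the inner loop on the zero row of length 2*mid sets every entry
  have hset : (fun (r : List Int) (j : Nat) => r.set j (mmVal C11 C12 C21 C22 C11.length i j))
      = (fun r j => r.modify j (fun _ => mmVal C11 C12 C21 C22 C11.length i j)) := by
    funext r j; exact List.set_eq_modify _ _ _
  rw [hset, pv_foldl_modify_range (0 : Int)
        (fun j _ => mmVal C11 C12 C21 C22 C11.length i j) (C11.length * 2) _ (by simp)]
  simp

theorem merge_matrix_main (C11 C12 C21 C22 : List (List Int))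
    (hpre : Pre_merge_matrix C11 C12 C21 C22) :
    merge_matrix C11 C12 C21 C22 = merge_matrix_alt C11 C12 C21 C22 := by
  obtain ⟨h12, h21, h22, r11, r12, r21, r22⟩ := hpre
  rw [merge_matrix_eq_map]
  unfold merge_matrix_alt
  simp only
  have hz1 : ((List.range C11.length).map
      (fun i => (C11.getD i []).take C11.length ++ (C12.getD i []).take C11.length)).length
      = C11.length := by simp
  apply List.ext_getElem (by simp; omega)
  intro i hL hR
  have hiN : i < C11.length * 2 := by simpa using hL
  rw [List.getElem_map, List.getElem_range]
  by_cases hi : i < C11.length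
  · -- top half: row i is C11[i][:mid] ++ C12[i][:mid]
    rw [List.getElem_append_left (by rw [hz1]; exact hi)]
    rw [List.getElem_map, List.getElem_range]
    have him : i % C11.length = i := Nat.mod_eq_of_lt hi
    have hg11 : C11.getD i [] = C11[i] := List.getD_eq_getElem C11 [] hi
    have hg12 : C12.getD i [] = C12[i]'(by omega) := List.getD_eq_getElem C12 [] (by omega)
    have h11r : C11.length ≤ C11[i].length := r11 _ (List.getElem_mem _)
    have h12r : C11.length ≤ (C12[i]'(by omega)).length := by
      have : (C12.take C11.length)[i]'(by simp; omega) = C12[i]'(by omega) :=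
        List.getElem_take
      exact this ▸ r12 _ (List.getElem_mem _)
    rw [hg11, hg12]
    apply List.ext_getElem (by simp; omega)
    intro j h1 h2
    have hjN : j < C11.length * 2 := by simpa using h1
    rw [List.getElem_map, List.getElem_range]
    unfold mmVal
    by_cases hj : j < C11.length
    · rw [if_pos ⟨hi, hj⟩]
      have hjm : j % C11.length = j := Nat.mod_eq_of_lt hj
      rw [List.getD_eq_getElem C11 [] (by simp only [him]; exact hi)]
      rw [List.getD_eq_getElem _ 0 (by simp only [him, hjm]; omega)]
      rw [List.getElem_append_left (by simp; omega)]
      simp [him, hjm]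
    · rw [if_neg (by omega), if_neg (by omega), if_pos ⟨hi, by omega⟩]
      have hjm : j % C11.length = j - C11.length := by
        rw [Nat.mod_eq_sub_mod (by omega), Nat.mod_eq_of_lt (by omega)]
      rw [List.getD_eq_getElem C12 [] (by simp only [him]; omega)]
      rw [List.getD_eq_getElem _ 0 (by simp only [him, hjm]; omega)]
      rw [List.getElem_append_right (by simp; omega)]
      simp [him, hjm, Nat.min_eq_left h11r]
  · -- bottom half: row i is C21[i-mid][:mid] ++ C22[i-mid][:mid]
    rw [List.getElem_append_right (by rw [hz1]; omega)]
    simp only [hz1]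
    rw [List.getElem_map, List.getElem_range]
    have him : i % C11.length = i - C11.length := by
      rw [Nat.mod_eq_sub_mod (by omega), Nat.mod_eq_of_lt (by omega)]
    have hg21 : C21.getD (i - C11.length) [] = C21[i - C11.length]'(by omega) :=
      List.getD_eq_getElem C21 [] (by omega)
    have hg22 : C22.getD (i - C11.length) [] = C22[i - C11.length]'(by omega) :=
      List.getD_eq_getElem C22 [] (by omega)
    have h21r : C11.length ≤ (C21[i - C11.length]'(by omega)).length := by
      have : (C21.take C11.length)[i - C11.length]'(by simp; omega)
          = C21[i - C11.length]'(by omega) := List.getElem_take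
      exact this ▸ r21 _ (List.getElem_mem _)
    have h22r : C11.length ≤ (C22[i - C11.length]'(by omega)).length := by
      have : (C22.take C11.length)[i - C11.length]'(by simp; omega)
          = C22[i - C11.length]'(by omega) := List.getElem_take
      exact this ▸ r22 _ (List.getElem_mem _)
    rw [hg21, hg22]
    apply List.ext_getElem (by simp; omega)
    intro j h1 h2
    have hjN : j < C11.length * 2 := by simpa using h1
    rw [List.getElem_map, List.getElem_range]
    unfold mmVal
    by_cases hj : j < C11.length
    · rw [if_neg (by omega), if_neg (by omega), if_neg (by omega)]
      have hjm : j % C11.length = j := Nat.mod_eq_of_lt hj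
      rw [List.getD_eq_getElem C21 [] (by simp only [him]; omega)]
      rw [List.getD_eq_getElem _ 0 (by simp only [him, hjm]; omega)]
      rw [List.getElem_append_left (by simp; omega)]
      simp [him, hjm]
    · rw [if_neg (by omega), if_pos ⟨by omega, by omega⟩]
      have hjm : j % C11.length = j - C11.length := by
        rw [Nat.mod_eq_sub_mod (by omega), Nat.mod_eq_of_lt (by omega)]
      rw [List.getD_eq_getElem C22 [] (by simp only [him]; omega)]
      rw [List.getD_eq_getElem _ 0 (by simp only [him, hjm]; omega)]
      rw [List.getElem_append_right (by simp; omega)]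
      simp [him, hjm, Nat.min_eq_left h21r]

-- ===== VERDICT (by name: the statement is the Claim_ definition above) =====
theorem merge_matrix_spec : Claim_equal_merge_matrix := by
  intro C11 C12 C21 C22 _ hpre
  unfold Spec_merge_matrix
  exact merge_matrix_main C11 C12 C21 C22 hpre
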